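-- pv_equiv track=rewrite | github.com/Secoraa/Secoraa-platform | app/scanners/network_scanner/cve_lookup.py | _references
-- ===== SOURCE A (Python) =====
-- from typing import Any, Dict, List, Optional, Tuple
--
-- def _references(record: Dict[str, Any]) -> Optional[str]:
--     refs = record.get("references") or []
--     urls = [r.get("url") for r in refs if isinstance(r, dict) and r.get("url")]
--     if not urls:
--         return None
--     # Prefer NVD links when present, then advisory, then anything.
--     nvd = [u for u in urls if "nvd.nist.gov" in u]
--     if nvd:
--         return nvd[0]
--     return urls[0]
-- ===== SOURCE B (Python) =====
-- from typing import Any, Dict, Optional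
--
-- def _references(record: Dict[str, Any]) -> Optional[str]:
--     # Rank-and-select: tag each url with a (priority, position) key and take the minimum.
--     candidates = [
--         ((0 if "nvd.nist.gov" in r["url"] else 1, i), r["url"])
--         for i, r in enumerate(record.get("references") or [])
--         if isinstance(r, dict) and r.get("url")
--     ]
--     best = min(candidates, key=lambda c: c[0], default=None)
--     return None if best is None else best[1]
-- ===== Notes on version B (the rewrite author's own statement) =====
-- stated objective: alternative
-- what changed: B replaces A's filter-then-first-match selection (build urls list, filter for NVD links, take the head) with rank-and-select: every url is tagged with a (priority, position) key (priority 0 for nvd.nist.gov links, else 1) and the answer is the minimum-key candidate via min(..., key=..., default=None).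
import Mathlib
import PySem

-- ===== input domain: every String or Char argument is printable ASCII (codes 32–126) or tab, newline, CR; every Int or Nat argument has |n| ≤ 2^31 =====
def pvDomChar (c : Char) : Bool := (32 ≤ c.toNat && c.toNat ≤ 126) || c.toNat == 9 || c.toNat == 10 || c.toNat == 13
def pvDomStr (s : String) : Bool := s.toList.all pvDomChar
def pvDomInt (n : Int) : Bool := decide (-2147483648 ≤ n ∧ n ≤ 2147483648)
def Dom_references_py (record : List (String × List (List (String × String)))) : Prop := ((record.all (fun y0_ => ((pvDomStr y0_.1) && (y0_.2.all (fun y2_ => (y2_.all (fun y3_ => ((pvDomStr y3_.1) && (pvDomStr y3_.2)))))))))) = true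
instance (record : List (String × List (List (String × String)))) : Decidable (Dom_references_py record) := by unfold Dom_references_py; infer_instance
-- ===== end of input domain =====

-- B replaces A's filter-then-first-match passes with rank-and-select: each url gets a
-- (priority, position) key and min(..., key=...) picks the answer (objective: alternative).

-- ===== PORT A =====
-- A's comprehension element: r.get("url") if it is a truthy (nonempty) string, else skipped.
-- (isinstance(r, dict) is always true under the declared type.)
def pvUrl? (r : List (String × String)) : Option String :=
  match (PySem.Dict.mk r).get? "url" with
  | some u => if u ≠ "" then some u else none
  | none => none

-- refs = record.get("references") or []: a missing key gives None and `or []` turns both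
-- None and an empty list into []; with list-typed values this is exactly getD [].
def references_py (record : List (String × List (List (String × String)))) : Option String :=
  let refs := ((PySem.Dict.mk record).get? "references").getD []
  let urls := refs.filterMap pvUrl?
  if urls = [] then none
  else
    let nvd := urls.filter (fun u => PySem.Str.isIn "nvd.nist.gov" u)
    match nvd with
    | u :: _ => some u      -- nvd[0]
    | [] => urls.head?      -- urls[0] (urls nonempty here)

-- ===== PORT B =====
-- B's priority: 0 for nvd.nist.gov links, 1 otherwise.
def pvRank (u : String) : Int := if PySem.Str.isIn "nvd.nist.gov" u then 0 else 1

-- B's comprehension element for one enumerated ref (i, r): the keyed candidate, or skipped.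
def pvCand1 (p : Int × List (String × String)) : Option ((Int × Int) × String) :=
  match (PySem.Dict.mk p.2).get? "url" with
  | some u => if u ≠ "" then some ((pvRank u, p.1), u) else none
  | none => none

-- min(candidates, key=lambda c: c[0], default=None): the key is the lexicographic pair,
-- which is PySem.List.min2? with the two components as keys.
def references_py_alt (record : List (String × List (List (String × String)))) : Option String :=
  let refs := ((PySem.Dict.mk record).get? "references").getD []
  let candidates := (PySem.List.enumerate refs).filterMap pvCand1
  match PySem.List.min2? candidates (fun c => c.1.1) (fun c => c.1.2) with
  | none => none
  | some best => some best.2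

-- ===== PRECONDITION & SPEC =====
def Spec_references_py (record : List (String × List (List (String × String)))) (out : Option String) : Prop := out = references_py_alt record
instance (record : List (String × List (List (String × String)))) (out : Option String) : Decidable (Spec_references_py record out) := by unfold Spec_references_py; infer_instance

-- ===== CLAIM =====
def Claim_equal_references_py : Prop := ∀ (record : List (String × List (List (String × String)))), Dom_references_py record → Spec_references_py record (references_py record)

-- ===== LEMMAS AND PROOFS =====

-- The step of min2?'s fold, named so the invariant can be stated.
def pvMStep (acc : Option ((Int × Int) × String)) (x : (Int × Int) × String) :
    Option ((Int × Int) × String) :=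
  match acc with
  | none => some x
  | some m =>
      if (decide (x.1.1 < m.1.1) || !decide (m.1.1 < x.1.1) && decide (x.1.2 < m.1.2)) = true
      then some x else some m

lemma min2?_eq_foldl (xs : List ((Int × Int) × String)) :
    PySem.List.min2? xs (fun c => c.1.1) (fun c => c.1.2) = xs.foldl pvMStep none := by
  simp only [PySem.List.min2?]
  congr 1
  funext acc x
  cases acc <;> rfl

lemma pvRank_cases (u : String) : pvRank u = 0 ∨ pvRank u = 1 := by
  unfold pvRank; split <;> simp

-- Candidates project to A's urls list.
lemma cand_proj (refs : List (List (String × String))) (s : Int) :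
    ((PySem.List.enumerate refs s).filterMap pvCand1).map (·.2) = refs.filterMap pvUrl? := by
  induction refs generalizing s with
  | nil => simp [PySem.List.enumerate_nil]
  | cons r t ih =>
    rw [PySem.List.enumerate_cons, List.filterMap_cons, List.filterMap_cons]
    cases h : (PySem.Dict.mk r).get? "url" with
    | none =>
      have h1 : pvCand1 (s, r) = none := by simp [pvCand1, h]
      have h2 : pvUrl? r = none := by simp [pvUrl?, h]
      rw [h1, h2]; exact ih (s + 1)
    | some u =>
      by_cases hu : u = ""
      · have h1 : pvCand1 (s, r) = none := by simp [pvCand1, h, hu]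
        have h2 : pvUrl? r = none := by simp [pvUrl?, h, hu]
        rw [h1, h2]; exact ih (s + 1)
      · have h1 : pvCand1 (s, r) = some ((pvRank u, s), u) := by simp [pvCand1, h, hu]
        have h2 : pvUrl? r = some u := by simp [pvUrl?, h, hu]
        rw [h1, h2, List.map_cons, ih (s + 1)]

-- Rank-0 candidates project to A's nvd list.
lemma cand_proj_nvd (refs : List (List (String × String))) (s : Int) :
    (((PySem.List.enumerate refs s).filterMap pvCand1).filter
        (fun c => decide (c.1.1 = 0))).map (·.2)
      = (refs.filterMap pvUrl?).filter (fun u => PySem.Str.isIn "nvd.nist.gov" u) := by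
  induction refs generalizing s with
  | nil => simp [PySem.List.enumerate_nil]
  | cons r t ih =>
    rw [PySem.List.enumerate_cons, List.filterMap_cons, List.filterMap_cons]
    cases h : (PySem.Dict.mk r).get? "url" with
    | none =>
      have h1 : pvCand1 (s, r) = none := by simp [pvCand1, h]
      have h2 : pvUrl? r = none := by simp [pvUrl?, h]
      rw [h1, h2]; exact ih (s + 1)
    | some u =>
      by_cases hu : u = ""
      · have h1 : pvCand1 (s, r) = none := by simp [pvCand1, h, hu]
        have h2 : pvUrl? r = none := by simp [pvUrl?, h, hu]
        rw [h1, h2]; exact ih (s + 1)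
      · have h1 : pvCand1 (s, r) = some ((pvRank u, s), u) := by simp [pvCand1, h, hu]
        have h2 : pvUrl? r = some u := by simp [pvUrl?, h, hu]
        rw [h1, h2, List.filter_cons, List.filter_cons]
        by_cases hn : PySem.Str.isIn "nvd.nist.gov" u = true
        · simp only [pvRank, hn, if_pos]
          simp [ih (s + 1)]
        · simp only [pvRank, if_neg hn]
          have h3 : ¬ ((1 : Int) = 0) := by norm_num
          simp [ih (s + 1), h3]

-- Fold invariant from an accumulator whose position key is below everything to come:
-- a rank-0 accumulator is final; a rank-1 one is replaced by the first rank-0 candidate.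
lemma fold_from_some (refs : List (List (String × String))) (s rm im : Int) (um : String)
    (him : im < s) (hrm : rm = 0 ∨ rm = 1) :
    ((PySem.List.enumerate refs s).filterMap pvCand1).foldl pvMStep (some ((rm, im), um))
      = if rm = 0 then some ((rm, im), um)
        else (((PySem.List.enumerate refs s).filterMap pvCand1).filter
                (fun c => decide (c.1.1 = 0))).head?.or (some ((rm, im), um)) := by
  induction refs generalizing s rm im um with
  | nil =>
    rcases hrm with h | h <;> simp [PySem.List.enumerate_nil, h]
  | cons r t ih =>
    rw [PySem.List.enumerate_cons, List.filterMap_cons]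
    cases h : (PySem.Dict.mk r).get? "url" with
    | none =>
      have h1 : pvCand1 (s, r) = none := by simp [pvCand1, h]
      rw [h1]; exact ih (s + 1) rm im um (by omega) hrm
    | some u =>
      by_cases hu : u = ""
      · have h1 : pvCand1 (s, r) = none := by simp [pvCand1, h, hu]
        rw [h1]; exact ih (s + 1) rm im um (by omega) hrm
      · have h1 : pvCand1 (s, r) = some ((pvRank u, s), u) := by simp [pvCand1, h, hu]
        rw [h1, List.foldl_cons]
        have hlt : ¬ ((s : Int) < im) := by omega
        rcases hrm with h0 | h1'
        · -- rank-0 accumulator never replaced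
          have hstep : pvMStep (some ((rm, im), um)) ((pvRank u, s), u)
              = some ((rm, im), um) := by
            rcases pvRank_cases u with hru | hru <;>
              simp [pvMStep, h0, hru, hlt]
          rw [hstep, ih (s + 1) rm im um (by omega) (Or.inl h0), if_pos h0, if_pos h0]
        · rcases pvRank_cases u with hru | hru
          · -- accumulator rank 1, candidate rank 0: replace; stays by rank-0 case
            have hstep : pvMStep (some ((rm, im), um)) ((pvRank u, s), u)
                = some ((pvRank u, s), u) := by
              simp [pvMStep, h1', hru]
            rw [hstep, ih (s + 1) (pvRank u) s u (by omega) (Or.inl hru), if_pos hru,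
              if_neg (by rw [h1']; norm_num), List.filter_cons,
              if_pos (by simp [hru]), List.head?_cons, Option.some_or]
          · -- both rank 1: keep accumulator
            have hstep : pvMStep (some ((rm, im), um)) ((pvRank u, s), u)
                = some ((rm, im), um) := by
              simp [pvMStep, h1', hru, hlt]
            rw [hstep, ih (s + 1) rm im um (by omega) (Or.inr h1'),
              if_neg (by rw [h1']; norm_num), if_neg (by rw [h1']; norm_num),
              List.filter_cons, if_neg (by simp [hru])]

-- min2? over the candidates is the first rank-0 candidate, else the first candidate.
lemma fold_from_none (refs : List (List (String × String))) (s : Int) :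
    ((PySem.List.enumerate refs s).filterMap pvCand1).foldl pvMStep none
      = (((PySem.List.enumerate refs s).filterMap pvCand1).filter
            (fun c => decide (c.1.1 = 0))).head?.or
          ((PySem.List.enumerate refs s).filterMap pvCand1).head? := by
  induction refs generalizing s with
  | nil => simp [PySem.List.enumerate_nil]
  | cons r t ih =>
    rw [PySem.List.enumerate_cons, List.filterMap_cons]
    cases h : (PySem.Dict.mk r).get? "url" with
    | none =>
      have h1 : pvCand1 (s, r) = none := by simp [pvCand1, h]
      rw [h1]; exact ih (s + 1)
    | some u =>
      by_cases hu : u = ""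
      · have h1 : pvCand1 (s, r) = none := by simp [pvCand1, h, hu]
        rw [h1]; exact ih (s + 1)
      · have h1 : pvCand1 (s, r) = some ((pvRank u, s), u) := by simp [pvCand1, h, hu]
        rw [h1, List.foldl_cons]
        have hfirst : pvMStep none ((pvRank u, s), u) = some ((pvRank u, s), u) := rfl
        rw [hfirst, fold_from_some t (s + 1) (pvRank u) s u (by omega) (pvRank_cases u),
          List.filter_cons, List.head?_cons]
        rcases pvRank_cases u with hru | hru <;> simp [hru]

-- ===== VERDICT =====
theorem references_py_spec : Claim_equal_references_py := by
  intro record _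
  unfold Spec_references_py references_py references_py_alt
  dsimp only
  rw [min2?_eq_foldl, fold_from_none]
  have hnvd := cand_proj_nvd (((PySem.Dict.mk record).get? "references").getD []) 0
  have hurls := cand_proj (((PySem.Dict.mk record).get? "references").getD []) 0
  cases hf : (((PySem.List.enumerate (((PySem.Dict.mk record).get? "references").getD []) 0).filterMap
      pvCand1).filter (fun c => decide (c.1.1 = 0))).head? with
  | some c =>
    rcases List.head?_eq_some_iff.mp hf with ⟨rest, hr⟩
    rw [hr, List.map_cons] at hnvd
    have hne : (((PySem.Dict.mk record).get? "references").getD []).filterMap pvUrl? ≠ [] := by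
      intro h0
      rw [h0] at hnvd; simp at hnvd
    rw [Option.some_or, if_neg hne, ← hnvd]
  | none =>
    rw [List.head?_eq_none_iff.mp hf, List.map_nil] at hnvd
    rw [Option.none_or]
    cases hc : (PySem.List.enumerate (((PySem.Dict.mk record).get? "references").getD []) 0).filterMap pvCand1 with
    | nil =>
      rw [hc, List.map_nil] at hurls
      rw [if_pos hurls.symm]
      rfl
    | cons c rest =>
      rw [hc, List.map_cons] at hurls
      have hne : (((PySem.Dict.mk record).get? "references").getD []).filterMap pvUrl? ≠ [] := by
        rw [← hurls]; simp
      rw [List.head?_cons, if_neg hne, ← hnvd, ← hurls]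
      rfl
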